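-- pv_equiv track=rewrite | github.com/a0a7/svtplayarr | content_matcher.py | get_best_match_url
-- ===== SOURCE A (Python) =====
-- from typing import Optional, List, Dict
--
-- def get_best_match_url(urls: List[str], title: str) -> Optional[str]:
--     if not urls:
--         return None
--
--     # Simple scoring based on URL content
--     scored_urls = []
--     title_words = title.lower().split()
--
--     for url in urls:
--         score = 0
--         url_lower = url.lower()
--
--         for word in title_words:
--             if word in url_lower:
--                 score += 1
--
--         scored_urls.append((score, url))
--
--     # Sort by score and return best match
--     scored_urls.sort(key=lambda x: x[0], reverse=True)
--     return scored_urls[0][1] if scored_urls else urls[0]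
-- ===== SOURCE B (Python) =====
-- def _word_hits(words, url):
--     url_lower = url.lower()
--     return sum(w in url_lower for w in words)
--
--
-- def get_best_match_url(urls, title):
--     if not urls:
--         return None
--     title_words = title.lower().split()
--     return max(urls, key=lambda u: _word_hits(title_words, u))
-- ===== Notes on version B (the rewrite author's own statement) =====
-- stated objective: simpler
-- what changed: Replaces the build-scored-list + stable reverse sort + take-head pipeline with a single max() scan keyed by the word-hit count (max returns the first maximum, matching the stable descending sort's tie-break).
import Mathlib
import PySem

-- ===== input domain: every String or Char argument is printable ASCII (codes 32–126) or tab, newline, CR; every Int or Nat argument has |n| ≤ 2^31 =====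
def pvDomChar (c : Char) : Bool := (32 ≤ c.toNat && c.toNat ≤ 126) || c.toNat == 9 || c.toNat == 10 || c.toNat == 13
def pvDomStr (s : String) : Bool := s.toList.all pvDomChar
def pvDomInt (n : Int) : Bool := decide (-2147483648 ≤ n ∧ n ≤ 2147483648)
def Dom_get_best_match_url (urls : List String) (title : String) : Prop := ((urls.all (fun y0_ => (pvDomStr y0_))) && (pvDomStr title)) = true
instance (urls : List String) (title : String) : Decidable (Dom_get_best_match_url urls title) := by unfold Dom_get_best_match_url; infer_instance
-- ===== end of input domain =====

-- B replaces A's build-scored-list + stable reverse sort + take-head pipeline by a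
-- single first-max scan with the same word-hit score (simpler; same return value).

-- ===== PORT A =====
def get_best_match_url (urls : List String) (title : String) : Option String :=
  if urls = [] then none else
  let title_words := PySem.Str.split₀ (PySem.Str.lower title)
  let scored_urls := urls.foldl (fun acc url =>
      let url_lower := PySem.Str.lower url
      let score := title_words.foldl
        (fun s word => if PySem.Str.isIn word url_lower then s + 1 else s) (0 : Int)
      acc ++ [(score, url)]) ([] : List (Int × String))
  let sorted_urls := PySem.List.sorted scored_urls (fun x => x.1) true
  match sorted_urls with
  | p :: _ => some p.2
  | [] => PySem.List.pyGet? urls 0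

-- ===== PORT B =====
def pvScore (title_words : List String) (u : String) : Int :=
  let url_lower := PySem.Str.lower u
  title_words.foldl
    (fun s w => s + (if PySem.Str.isIn w url_lower then 1 else 0)) 0

def get_best_match_url_alt (urls : List String) (title : String) : Option String :=
  if urls = [] then none else
  let title_words := PySem.Str.split₀ (PySem.Str.lower title)
  PySem.List.max? urls (pvScore title_words)

-- ===== PRECONDITION & SPEC =====
def Spec_get_best_match_url (urls : List String) (title : String) (out : Option String) : Prop := out = get_best_match_url_alt urls title
instance (urls : List String) (title : String) (out : Option String) : Decidable (Spec_get_best_match_url urls title out) := by unfold Spec_get_best_match_url; infer_instance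

-- ===== CLAIM (what is proved, stated in full; the proofs are below) =====
def Claim_equal_get_best_match_url : Prop := ∀ (urls : List String) (title : String), Dom_get_best_match_url urls title → Spec_get_best_match_url urls title (get_best_match_url urls title)

-- ===== LEMMAS AND PROOFS =====

-- head of an insertBy (reverse order) insertion = the strict-max step of max?
theorem pv_head_insertBy {α : Type} (key : α → Int) (x : α) (acc : List α) :
    (PySem.List.insertBy (fun a b => decide (key b < key a)) x acc).head? =
      match acc.head? with
      | none => some x
      | some m => if key m < key x then some x else some m := by
  cases acc with
  | nil => simp [PySem.List.insertBy]
  | cons y ys =>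
      simp only [PySem.List.insertBy, List.head?_cons]
      split_ifs with h <;> simp_all

theorem pv_head_foldl_insertBy {α : Type} (key : α → Int) (xs : List α) (acc : List α) :
    (xs.foldl (fun acc x =>
        PySem.List.insertBy (fun a b => decide (key b < key a)) x acc) acc).head? =
      xs.foldl (fun o x =>
        match o with
        | none => some x
        | some m => if key m < key x then some x else some m) acc.head? := by
  induction xs generalizing acc with
  | nil => rfl
  | cons x t ih => simp only [List.foldl_cons, ih, pv_head_insertBy]

-- head of Python's stable reverse sort = max? (first maximal element)
theorem pv_head_sorted_rev {α : Type} (key : α → Int) (xs : List α) :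
    (PySem.List.sorted xs key true).head? = PySem.List.max? xs key := by
  rw [PySem.List.sorted_rev_eq_foldl_insertBy, pv_head_foldl_insertBy]
  rfl

theorem pv_max?_map {α β : Type} (f : α → β) (kb : β → Int) (ka : α → Int)
    (hk : ∀ x, kb (f x) = ka x) (xs : List α) :
    PySem.List.max? (xs.map f) kb = Option.map f (PySem.List.max? xs ka) := by
  unfold PySem.List.max?
  rw [List.foldl_map]
  suffices h : ∀ (o : Option α),
      xs.foldl (fun acc x => match acc with
        | none => some (f x)
        | some m => if kb m < kb (f x) then some (f x) else some m) (Option.map f o) =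
      Option.map f (xs.foldl (fun acc x => match acc with
        | none => some x
        | some m => if ka m < ka x then some x else some m) o) by
    simpa using h none
  induction xs with
  | nil => intro o; rfl
  | cons x t ih =>
      intro o
      cases o with
      | none => simpa using ih (some x)
      | some m =>
          simp only [List.foldl_cons, Option.map_some]
          rw [hk x, hk m]
          split_ifs <;> [exact ih (some x); exact ih (some m)]

theorem pv_scoreA_eq_aux (title_words : List String) (u : String) : ∀ s : Int,
    title_words.foldl
      (fun s word => if PySem.Str.isIn word (PySem.Str.lower u) then s + 1 else s) s =
    title_words.foldl
      (fun s w => s + (if PySem.Str.isIn w (PySem.Str.lower u) then 1 else 0)) s := by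
  induction title_words with
  | nil => intro s; rfl
  | cons w t ih =>
      intro s
      simp only [List.foldl_cons]
      split_ifs
      · exact ih (s + 1)
      · simpa using ih s

theorem pv_scoreA_eq (title_words : List String) (u : String) :
    title_words.foldl
      (fun s word => if PySem.Str.isIn word (PySem.Str.lower u) then s + 1 else s) (0 : Int) =
    pvScore title_words u := pv_scoreA_eq_aux title_words u 0

theorem pv_scored_eq (f : String → Int × String) (urls : List String) :
    ∀ acc : List (Int × String),
      urls.foldl (fun acc url => acc ++ [f url]) acc = acc ++ urls.map f := by
  induction urls with
  | nil => intro acc; simp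
  | cons u t ih => intro acc; simp [ih]

-- ===== VERDICT (by name: the statement is the Claim_ definition above) =====
theorem get_best_match_url_spec : Claim_equal_get_best_match_url := by
  intro urls title _
  unfold Spec_get_best_match_url get_best_match_url get_best_match_url_alt
  by_cases h : urls = []
  · simp [h]
  · simp only [if_neg h]
    set tw := PySem.Str.split₀ (PySem.Str.lower title) with htw
    have hsc : urls.foldl (fun acc url =>
        acc ++ [(tw.foldl (fun s word =>
          if PySem.Str.isIn word (PySem.Str.lower url) then s + 1 else s) (0 : Int), url)])
        ([] : List (Int × String)) = urls.map (fun u => (pvScore tw u, u)) := by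
      rw [pv_scored_eq (fun url => (tw.foldl (fun s word =>
        if PySem.Str.isIn word (PySem.Str.lower url) then s + 1 else s) (0 : Int), url)) urls []]
      simp only [List.nil_append]
      exact List.map_congr_left (fun u _ => by rw [pv_scoreA_eq])
    simp only [hsc]
    have hmax : (PySem.List.sorted (urls.map (fun u => (pvScore tw u, u)))
        (fun x => x.1) true).head? =
        Option.map (fun u => (pvScore tw u, u)) (PySem.List.max? urls (pvScore tw)) := by
      rw [pv_head_sorted_rev, pv_max?_map (fun u => (pvScore tw u, u)) (fun x => x.1)
        (pvScore tw) (fun _ => rfl)]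
    cases hm : PySem.List.max? urls (pvScore tw) with
    | none =>
        exact absurd ((PySem.List.max?_eq_none_iff _ _).mp hm) h
    | some m =>
        rw [hm] at hmax
        cases hs : PySem.List.sorted (urls.map (fun u => (pvScore tw u, u))) (fun x => x.1) true with
        | nil => rw [hs] at hmax; simp at hmax
        | cons p t =>
            rw [hs] at hmax
            simp only [List.head?_cons, Option.map_some, Option.some.injEq] at hmax
            simp [hmax]
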